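-- pv_equiv track=rewrite | github.com/annieetang/coda_app | backend/app.py | _find_duplicate_length_ranges
-- ===== SOURCE A (Python) =====
-- def _find_duplicate_length_ranges(durations_list):
--     windows = [] # start_time, end_time
--
--     curr_val_count = 0
--     curr_val = -1
--     i = 0
--     j = 0
--     # for j in range(len(durations_list)):
--     while j < len(durations_list):
--         if durations_list[j] > 0:
--             if curr_val < 0:
--                 curr_val = durations_list[j]
--                 curr_val_count += 1
--                 i = j
--             elif durations_list[j] == curr_val:
--                 curr_val_count += 1
--             else:
--                 if curr_val_count > 1:
--                     windows.append((i, j, curr_val_count))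
--                 curr_val = durations_list[j]
--                 curr_val_count = 1
--                 i = j
--
--         j += 1
--
--     if curr_val_count > 1:
--         windows.append((i, j, curr_val_count))
--
--     return windows
-- ===== SOURCE B (Python) =====
-- def _find_duplicate_length_ranges(durations_list):
--     # Two-pass: compress to the positive entries with their indices, then group maximal
--     # runs of equal values in the compressed table; p..q-1 spans the current run.
--     positives = [(i, v) for i, v in enumerate(durations_list) if v > 0]
--     n = len(durations_list)
--     windows = []
--     p = 0
--     while p < len(positives):
--         i0, v = positives[p]
--         q = p + 1
--         while q < len(positives) and positives[q][1] == v: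
--             q += 1
--         count = q - p
--         if count > 1:
--             end = positives[q][0] if q < len(positives) else n
--             windows.append((i0, end, count))
--         p = q
--     return windows
-- ===== Notes on version B (the rewrite author's own statement) =====
-- stated objective: alternative
-- what changed: A's single interleaved while loop (skipping non-positives while tracking curr_val/count/start) is replaced by a two-pass decomposition: first compress the list to an (index, value) table of the positive entries, then group maximal runs of equal values in that table, taking the next run's original index (or len) as the range end.
import Mathlib
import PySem

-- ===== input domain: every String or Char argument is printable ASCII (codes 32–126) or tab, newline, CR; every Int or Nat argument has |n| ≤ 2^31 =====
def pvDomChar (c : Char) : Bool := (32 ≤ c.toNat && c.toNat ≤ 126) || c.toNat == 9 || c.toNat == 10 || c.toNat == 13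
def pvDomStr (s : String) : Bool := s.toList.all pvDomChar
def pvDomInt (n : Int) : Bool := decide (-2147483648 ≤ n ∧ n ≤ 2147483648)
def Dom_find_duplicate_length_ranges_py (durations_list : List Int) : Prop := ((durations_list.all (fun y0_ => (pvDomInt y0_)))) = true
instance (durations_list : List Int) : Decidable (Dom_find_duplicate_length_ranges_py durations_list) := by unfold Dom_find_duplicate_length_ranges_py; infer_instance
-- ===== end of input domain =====

-- B replaces A's single interleaved while loop by a two-pass decomposition (filter the positive
-- entries with their indices, then group maximal runs of equal values); objective: alternative.

-- ===== PORT A =====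
-- state of A's while loop: remaining list, j, windows, curr_val_count, curr_val, i
def fdlrLoopA : List Int → Int → List (Int × Int × Int) → Int → Int → Int → List (Int × Int × Int)
  | [], j, windows, cnt, _, i =>
      if cnt > 1 then windows ++ [(i, j, cnt)] else windows
  | x :: rest, j, windows, cnt, cv, i =>
      if x > 0 then
        if cv < 0 then fdlrLoopA rest (j + 1) windows (cnt + 1) x j
        else if x = cv then fdlrLoopA rest (j + 1) windows (cnt + 1) cv i
        else fdlrLoopA rest (j + 1)
               (if cnt > 1 then windows ++ [(i, j, cnt)] else windows) 1 x j
      else fdlrLoopA rest (j + 1) windows cnt cv i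

def find_duplicate_length_ranges_py (durations_list : List Int) : List (Int × Int × Int) :=
  fdlrLoopA durations_list 0 [] 0 (-1) 0

-- ===== PORT B =====
-- Source B's "positives[q][0] if q < len(positives) else n" (rest = the suffix positives[q:])
def fdlrEnd (rest : List (Int × Int)) (n : Int) : Int :=
  match rest with
  | [] => n
  | (i1, _) :: _ => i1

-- Source B's outer loop over runs of the compressed (index, value) table; the suffix positives[p:]
-- is the list argument, the inner q-scan is the takeWhile/dropWhile split, count = q - p
def fdlrGroup (n : Int) : List (Int × Int) → List (Int × Int × Int)
  | [] => []
  | (i0, v) :: tail =>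
      let run := (tail.takeWhile (fun p => p.2 == v)).length
      let rest := tail.dropWhile (fun p => p.2 == v)
      let count : Int := 1 + (run : Int)
      let res := fdlrGroup n rest
      if count > 1 then (i0, fdlrEnd rest n, count) :: res else res
  termination_by l => l.length
  decreasing_by
    simp only [List.length_cons]
    exact Nat.lt_succ_of_le (List.length_dropWhile_le _ _)

def find_duplicate_length_ranges_py_alt (durations_list : List Int) : List (Int × Int × Int) :=
  let positives := (PySem.List.enumerate durations_list).filter (fun p => p.2 > 0)
  fdlrGroup (durations_list.length : Int) positives

-- ===== PRECONDITION & SPEC =====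
def Spec_find_duplicate_length_ranges_py (durations_list : List Int) (out : List (Int × Int × Int)) : Prop := out = find_duplicate_length_ranges_py_alt durations_list
instance (durations_list : List Int) (out : List (Int × Int × Int)) : Decidable (Spec_find_duplicate_length_ranges_py durations_list out) := by unfold Spec_find_duplicate_length_ranges_py; infer_instance

-- ===== CLAIM (what is proved, stated in full; the proofs are below) =====
def Claim_equal_find_duplicate_length_ranges_py : Prop := ∀ (durations_list : List Int), Dom_find_duplicate_length_ranges_py durations_list → Spec_find_duplicate_length_ranges_py durations_list (find_duplicate_length_ranges_py durations_list)

-- ===== LEMMAS AND PROOFS =====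

-- positives of the remaining list, enumerated from start index j
def fdlrPos (ds : List Int) (j : Int) : List (Int × Int) :=
  (PySem.List.enumerate ds j).filter (fun p => p.2 > 0)

theorem fdlrPos_nil (j : Int) : fdlrPos [] j = [] := by
  simp [fdlrPos, PySem.List.enumerate_nil]

theorem fdlrPos_cons_pos (x : Int) (rest : List Int) (j : Int) (hx : x > 0) :
    fdlrPos (x :: rest) j = (j, x) :: fdlrPos rest (j + 1) := by
  simp [fdlrPos, PySem.List.enumerate_cons, hx]

theorem fdlrPos_cons_neg (x : Int) (rest : List Int) (j : Int) (hx : ¬ x > 0) :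
    fdlrPos (x :: rest) j = fdlrPos rest (j + 1) := by
  simp [fdlrPos, PySem.List.enumerate_cons, hx]

theorem fdlrGroup_cons (n : Int) (i0 v : Int) (tail : List (Int × Int)) :
    fdlrGroup n ((i0, v) :: tail) =
      (if 1 + (((tail.takeWhile (fun p => p.2 == v)).length : Nat) : Int) > 1 then
        [(i0, fdlrEnd (tail.dropWhile (fun p => p.2 == v)) n,
          1 + (((tail.takeWhile (fun p => p.2 == v)).length : Nat) : Int))]
       else []) ++ fdlrGroup n (tail.dropWhile (fun p => p.2 == v)) := by
  rw [fdlrGroup]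
  split_ifs with h <;> simp

-- the mid-run invariant: with an open run (cv > 0, cnt ≥ 1), A's loop closes the run at the
-- next differing positive element (or at the end) and then agrees with B's grouping
theorem fdlrLoopA_run (ds : List Int) : ∀ (j : Int) (w : List (Int × Int × Int)) (cnt cv i : Int),
    0 < cv → 1 ≤ cnt →
    fdlrLoopA ds j w cnt cv i =
      w ++
        ((if cnt + ((((fdlrPos ds j).takeWhile (fun p => p.2 == cv)).length : Nat) : Int) > 1 then
            [(i, fdlrEnd ((fdlrPos ds j).dropWhile (fun p => p.2 == cv)) (j + (ds.length : Int)),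
              cnt + ((((fdlrPos ds j).takeWhile (fun p => p.2 == cv)).length : Nat) : Int))]
          else []) ++
          fdlrGroup (j + (ds.length : Int)) ((fdlrPos ds j).dropWhile (fun p => p.2 == cv))) := by
  induction ds with
  | nil =>
    intro j w cnt cv i hcv hcnt
    simp only [fdlrLoopA, fdlrPos_nil, List.takeWhile_nil, List.dropWhile_nil, List.length_nil,
      Int.natCast_zero, add_zero, fdlrGroup, fdlrEnd, List.append_nil]
    split_ifs <;> simp
  | cons x rest ih =>
    intro j w cnt cv i hcv hcnt
    have hn : j + (((x :: rest).length : Nat) : Int) = (j + 1) + ((rest.length : Nat) : Int) := by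
      simp only [List.length_cons]; push_cast; ring
    by_cases hx : x > 0
    · by_cases hxv : x = cv
      · -- run continues
        subst hxv
        have h1 : ¬ (x < 0) := by omega
        have h2 : (((j, x) : Int × Int).2 == x) = true := beq_self_eq_true x
        rw [show fdlrLoopA (x :: rest) j w cnt x i = fdlrLoopA rest (j + 1) w (cnt + 1) x i from by
          simp [fdlrLoopA, hx, h1]]
        rw [ih (j + 1) w (cnt + 1) x i hcv (by omega)]
        rw [fdlrPos_cons_pos x rest j hx, List.takeWhile_cons, List.dropWhile_cons,
          if_pos h2, if_pos h2, hn]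
        have hc : cnt + ((((j, x) :: (fdlrPos rest (j + 1)).takeWhile
            (fun p => p.2 == x)).length : Nat) : Int)
            = (cnt + 1) + ((((fdlrPos rest (j + 1)).takeWhile (fun p => p.2 == x)).length : Nat) : Int) := by
          simp only [List.length_cons]; push_cast; ring
        rw [hc]
      · -- run closes here
        have hcvneg : ¬ (cv < 0) := by omega
        have h2 : ¬ ((((j, x) : Int × Int).2 == cv) = true) := by
          simp [hxv]
        rw [show fdlrLoopA (x :: rest) j w cnt cv i =
              fdlrLoopA rest (j + 1) (if cnt > 1 then w ++ [(i, j, cnt)] else w) 1 x j from by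
          simp [fdlrLoopA, hx, hcvneg, hxv]]
        rw [ih (j + 1) _ 1 x j hx (by omega)]
        rw [fdlrPos_cons_pos x rest j hx, List.takeWhile_cons, List.dropWhile_cons,
          if_neg h2, if_neg h2, hn, fdlrGroup_cons]
        simp only [List.length_nil, Int.natCast_zero, add_zero, fdlrEnd]
        split_ifs <;> simp [List.append_assoc]
    · -- non-positive entry: transparent
      rw [show fdlrLoopA (x :: rest) j w cnt cv i = fdlrLoopA rest (j + 1) w cnt cv i from by
        simp [fdlrLoopA, hx]]
      rw [ih (j + 1) w cnt cv i hcv hcnt, fdlrPos_cons_neg x rest j hx, hn]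

-- fresh-state invariant: from the initial state A's loop computes B's grouping
theorem fdlrLoopA_fresh (ds : List Int) : ∀ (j : Int) (w : List (Int × Int × Int)) (i : Int),
    fdlrLoopA ds j w 0 (-1) i = w ++ fdlrGroup (j + (ds.length : Int)) (fdlrPos ds j) := by
  induction ds with
  | nil =>
    intro j w i
    simp [fdlrLoopA, fdlrPos_nil, fdlrGroup]
  | cons x rest ih =>
    intro j w i
    have hn : j + (((x :: rest).length : Nat) : Int) = (j + 1) + ((rest.length : Nat) : Int) := by
      simp only [List.length_cons]; push_cast; ring
    by_cases hx : x > 0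
    · rw [show fdlrLoopA (x :: rest) j w 0 (-1) i = fdlrLoopA rest (j + 1) w 1 x j from by
        simp [fdlrLoopA, hx]]
      rw [fdlrLoopA_run rest (j + 1) w 1 x j hx (by omega),
        fdlrPos_cons_pos x rest j hx, fdlrGroup_cons, hn]
    · rw [show fdlrLoopA (x :: rest) j w 0 (-1) i = fdlrLoopA rest (j + 1) w 0 (-1) i from by
        simp [fdlrLoopA, hx]]
      rw [ih (j + 1) w i, fdlrPos_cons_neg x rest j hx, hn]

-- ===== VERDICT (by name: the statement is the Claim_ definition above) =====
theorem find_duplicate_length_ranges_py_spec : Claim_equal_find_duplicate_length_ranges_py := by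
  intro ds _
  show find_duplicate_length_ranges_py ds = find_duplicate_length_ranges_py_alt ds
  rw [find_duplicate_length_ranges_py, fdlrLoopA_fresh ds 0 []]
  simp [find_duplicate_length_ranges_py_alt, fdlrPos]
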